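-- pv_equiv track=rewrite | github.com/SonThanhNguyen13/steno | GUI_enc.py | stegano
-- ===== SOURCE A (Python) =====
-- def stegano(matrix, ciphertext):
--     j = 0
--     k = 0
--     row_len = len(matrix[1][1])
--     for index, item in enumerate(ciphertext):
--         if index % 3 == 0:
--             matrix[1][j][k] = matrix[1][j][k][:-1] + item
--         elif index % 3 == 1:
--             matrix[2][j][k] = matrix[2][j][k][:-1] + item
--         else:
--             matrix[3][j][k] = matrix[3][j][k][:-1] + item
--             k += 1
--             if k == row_len:
--                 j += 1
--                 k = 0
--     return matrix
-- ===== SOURCE B (Python) =====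
-- def stegano(matrix, ciphertext):
--     row_len = len(matrix[1][1])
--     for plane, chars in zip(matrix[1:4],
--                             (ciphertext[0::3], ciphertext[1::3], ciphertext[2::3])):
--         j = 0
--         while chars:
--             row = plane[j]
--             for k, ch in enumerate(chars[:row_len]):
--                 row[k] = row[k][:-1] + ch
--             chars = chars[row_len:]
--             j += 1
--     return matrix
-- ===== Notes on version B (the rewrite author's own statement) =====
-- stated objective: alternative
-- what changed: A makes one interleaved pass over the ciphertext, writing each char into channel 1+i%3 while maintaining mutable cursor counters j,k; B deinterleaves the ciphertext into its three channel strings (ciphertext[c::3]) and embeds each string into its own colour plane in a separate staged pass that consumes the string row-chunk by row-chunk. Pre_ excludes inputs with len(matrix[1][1])==0 and nonempty ciphertext, on which A returns (its wrap threshold is never reached and it keeps filling row 0) while B's row-chunking loop consumes nothing per row and runs off the end of the plane (IndexError).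
import Mathlib
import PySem

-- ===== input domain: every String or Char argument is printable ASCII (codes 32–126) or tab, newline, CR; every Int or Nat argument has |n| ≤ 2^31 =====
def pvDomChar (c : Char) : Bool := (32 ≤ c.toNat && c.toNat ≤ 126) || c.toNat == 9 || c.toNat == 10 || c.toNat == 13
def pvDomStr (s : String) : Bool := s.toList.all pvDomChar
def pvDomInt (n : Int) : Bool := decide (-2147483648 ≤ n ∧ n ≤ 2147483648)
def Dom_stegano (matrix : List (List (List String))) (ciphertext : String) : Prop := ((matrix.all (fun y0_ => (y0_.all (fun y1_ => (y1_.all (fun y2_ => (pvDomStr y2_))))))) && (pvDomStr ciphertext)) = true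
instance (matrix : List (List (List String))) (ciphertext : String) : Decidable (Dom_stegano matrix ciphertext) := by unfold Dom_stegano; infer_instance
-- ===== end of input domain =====

-- B replaces A's single interleaved pass (mutable cursor j,k advanced once per 3 chars) by
-- three staged passes: deinterleave the ciphertext into its three channel strings, then embed
-- each string into its own colour plane row by row (objective: alternative decomposition).
-- Both Pythons mutate `matrix` in place and return it; on Pre_ the in-place mutations coincide,
-- and the equivalence proved here is about the returned value.

-- ===== PORT A =====
-- cell update: matrix[c][j][k] = matrix[c][j][k][:-1] + item  (s[:-1] is dropLast; indices in range under Pre_)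
def pvWrite (m : List (List (List String))) (c j k : Nat) (item : Char) :
    List (List (List String)) :=
  let plane := m.getD c []
  let row := plane.getD j []
  let s := row.getD k ""
  m.set c (plane.set j (row.set k (String.ofList (s.toList.dropLast ++ [item]))))

def pvStepA (rowLen : Nat)
    (st : List (List (List String)) × Nat × Nat) (p : Int × Char) :
    List (List (List String)) × Nat × Nat :=
  match st with
  | (m, j, k) =>
    if PySem.Int.mod p.1 3 = 0 then (pvWrite m 1 j k p.2, j, k)
    else if PySem.Int.mod p.1 3 = 1 then (pvWrite m 2 j k p.2, j, k)
    else
      let m' := pvWrite m 3 j k p.2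
      let k' := k + 1
      if k' = rowLen then (m', j + 1, 0) else (m', j, k')

def stegano (matrix : List (List (List String))) (ciphertext : String) :
    List (List (List String)) :=
  let rowLen := ((matrix.getD 1 []).getD 1 []).length
  ((PySem.List.enumerate ciphertext.toList 0).foldl (pvStepA rowLen) (matrix, 0, 0)).1

-- ===== PORT B =====
-- row[k] = row[k][:-1] + ch
def pvRowWrite (row : List String) (k : Nat) (ch : Char) : List String :=
  row.set k (String.ofList ((row.getD k "").toList.dropLast ++ [ch]))

-- for k, ch in enumerate(chars[:row_len]): row[k] = row[k][:-1] + ch   (caller passes chars[:row_len])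
def pvFillRow (row : List String) (k : Nat) : List Char → List String
  | [] => row
  | ch :: rest => pvFillRow (pvRowWrite row k ch) (k + 1) rest

-- while chars: row = plane[j]; write chars[:row_len] into it; chars = chars[row_len:]; j += 1
-- (fuel = chars.length makes the recursion total; with row_len = 0 and chars ≠ [] the Python
-- loop consumes nothing and eventually raises IndexError on plane[j] — excluded by Pre_)
def pvFillPlane (rowLen : Nat) :
    Nat → List (List String) → Nat → List Char → List (List String)
  | 0, plane, _, _ => plane
  | fuel + 1, plane, j, chars =>
    if chars.isEmpty then plane
    else pvFillPlane rowLen fuel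
      (plane.set j (pvFillRow (plane.getD j []) 0 (chars.take rowLen)))
      (j + 1) (chars.drop rowLen)

-- ciphertext[c::3]: step-3 slice (PySem.List.slice?; step ≠ 0, so it is always `some`)
def pvChan (cs : List Char) (c : Nat) : List Char :=
  (PySem.List.slice? cs (some (c : Int)) none 3).getD []

def stegano_alt (matrix : List (List (List String))) (ciphertext : String) :
    List (List (List String)) :=
  let rowLen := ((matrix.getD 1 []).getD 1 []).length
  let cs := ciphertext.toList
  -- zip(matrix[1:4], (ciphertext[0::3], ciphertext[1::3], ciphertext[2::3])); the plane at
  -- position i of the zip is matrix[1 + i], mutated in place, hence the `set (i + 1)`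
  let pairs := List.zip (PySem.List.slice matrix (some 1) (some 4))
    [pvChan cs 0, pvChan cs 1, pvChan cs 2]
  pairs.zipIdx.foldl
    (fun m pc => m.set (pc.2 + 1) (pvFillPlane rowLen pc.1.2.length pc.1.1 0 pc.1.2))
    matrix

-- ===== PRECONDITION & SPEC =====
-- Pre_ = the inputs on which Python A returns (no IndexError: every cell the cursor visits
-- exists; for character i those are channel 1 + i % 3 and cell (i/3 / row_len, i/3 % row_len)),
-- MINUS the inputs with row_len = 0 and a nonempty ciphertext: there A's wrap threshold is never
-- reached and it keeps filling row 0, while B's row-chunking loop consumes no characters per row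
-- and runs off the end of the plane (IndexError).
def Pre_stegano (matrix : List (List (List String))) (ciphertext : String) : Prop :=
  2 ≤ matrix.length ∧ 2 ≤ (matrix.getD 1 []).length ∧
  (ciphertext.toList = [] ∨ 1 ≤ ((matrix.getD 1 []).getD 1 []).length) ∧
  ∀ i : Nat, i < ciphertext.toList.length →
    1 + i % 3 < matrix.length ∧
    i / 3 / ((matrix.getD 1 []).getD 1 []).length < (matrix.getD (1 + i % 3) []).length ∧
    i / 3 % ((matrix.getD 1 []).getD 1 []).length
      < ((matrix.getD (1 + i % 3) []).getD
          (i / 3 / ((matrix.getD 1 []).getD 1 []).length) []).length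
instance (matrix : List (List (List String))) (ciphertext : String) :
    Decidable (Pre_stegano matrix ciphertext) := by unfold Pre_stegano; infer_instance

def pvWitness_stegano : List (List (List String)) × String :=
  ([[], [["ab", "cd"], ["ef", "gh"]], [["ij", "kl"], ["mn", "op"]],
    [["qr", "st"], ["uv", "wx"]]], "XYZuvw")

def Spec_stegano (matrix : List (List (List String))) (ciphertext : String)
    (out : List (List (List String))) : Prop := out = stegano_alt matrix ciphertext
instance (matrix : List (List (List String))) (ciphertext : String)
    (out : List (List (List String))) : Decidable (Spec_stegano matrix ciphertext out) := by
  unfold Spec_stegano; infer_instance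

-- ===== CLAIM (what is proved, stated in full; the proofs are below) =====
def Claim_equal_stegano : Prop := ∀ (matrix : List (List (List String))) (ciphertext : String), Dom_stegano matrix ciphertext → Pre_stegano matrix ciphertext → Spec_stegano matrix ciphertext (stegano matrix ciphertext)

-- ===== LEMMAS AND PROOFS =====

-- getD / set toolbox
theorem pvGetDSetNe {α : Type} (l : List α) (i j : Nat) (h : i ≠ j) (v d : α) :
    (l.set i v).getD j d = l.getD j d := by
  simp [List.getD, List.getElem?_set_ne h]

theorem pvGetDSetSelf {α : Type} (l : List α) (i : Nat) (v d : α) :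
    (l.set i v).getD i d = if i < l.length then v else d := by
  by_cases h : i < l.length
  · simp [List.getD, h]
  · simp [List.getD, List.set_eq_of_length_le (le_of_not_gt h), h]

theorem pvSetGetDSelf {α : Type} (l : List α) (i : Nat) (d : α) :
    l.set i (l.getD i d) = l := by
  by_cases h : i < l.length
  · rw [List.getD_eq_getElem l d h]; exact List.set_getElem_self h
  · exact List.set_eq_of_length_le (le_of_not_gt h)

-- the per-plane write inside pvWrite
def pvPlaneW (plane : List (List String)) (j k : Nat) (ch : Char) : List (List String) :=
  plane.set j (pvRowWrite (plane.getD j []) k ch)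

theorem pvWrite_eq (m : List (List (List String))) (c j k : Nat) (ch : Char) :
    pvWrite m c j k ch = m.set c (pvPlaneW (m.getD c []) j k ch) := rfl

-- middle spec, matrix level: write chars of channel c sequentially at cursor (g/L, g%L), g increasing
def pvFillSeq (L c : Nat) : List Char → Nat → List (List (List String)) → List (List (List String))
  | [], _, m => m
  | ch :: rest, g, m => pvFillSeq L c rest (g + 1) (pvWrite m c (g / L) (g % L) ch)

-- middle spec, plane level
def pvFillSeqP (L : Nat) : List Char → Nat → List (List String) → List (List String)
  | [], _, p => p
  | ch :: rest, g, p => pvFillSeqP L rest (g + 1) (p.set (g / L) (pvRowWrite (p.getD (g / L) []) (g % L) ch))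

theorem pvFillSeqP_nil_plane (L : Nat) (chars : List Char) (g : Nat) :
    pvFillSeqP L chars g [] = [] := by
  induction chars generalizing g with
  | nil => rfl
  | cons ch rest ih => simp [pvFillSeqP, ih]

theorem pvFillSeq_eq_planeLevel (L c : Nat) (chars : List Char) :
    ∀ (g : Nat) (m : List (List (List String))),
      pvFillSeq L c chars g m = m.set c (pvFillSeqP L chars g (m.getD c [])) := by
  induction chars with
  | nil => intro g m; exact (pvSetGetDSelf m c []).symm
  | cons ch rest ih =>
    intro g m
    rw [pvFillSeq, pvWrite_eq, ih, pvFillSeqP]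
    by_cases h : c < m.length
    · rw [pvGetDSetSelf, if_pos h, List.set_set, pvPlaneW]
    · have hle := le_of_not_gt h
      have hm : ∀ v, m.set c v = m := fun v => List.set_eq_of_length_le hle
      have hg : m.getD c [] = [] := by
        simp [List.getD, List.getElem?_eq_none hle]
      simp [hm, h, pvFillSeqP_nil_plane, pvPlaneW]

-- writes to distinct planes commute
theorem pvWrite_comm (m : List (List (List String))) (c c' j k j' k' : Nat)
    (h : c ≠ c') (x y : Char) :
    pvWrite (pvWrite m c j k x) c' j' k' y = pvWrite (pvWrite m c' j' k' y) c j k x := by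
  simp only [pvWrite_eq]
  rw [pvGetDSetNe _ _ _ h, pvGetDSetNe _ _ _ (Ne.symm h)]
  exact List.set_comm _ _ h

theorem pvFillSeq_write_comm (L c c' : Nat) (h : c ≠ c') (chars : List Char) :
    ∀ (g j k : Nat) (x : Char) (m : List (List (List String))),
      pvFillSeq L c' chars g (pvWrite m c j k x)
        = pvWrite (pvFillSeq L c' chars g m) c j k x := by
  induction chars with
  | nil => intro g j k x m; rfl
  | cons ch rest ih =>
    intro g j k x m
    rw [pvFillSeq, pvFillSeq, pvWrite_comm _ _ _ _ _ _ _ h, ih]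

-- every third element: the channel strings ciphertext[c::3] are pvEvery3 (cs.drop c)
def pvEvery3 : List Char → List Char
  | [] => []
  | a :: t => a :: pvEvery3 (t.drop 2)
termination_by xs => xs.length
decreasing_by simp

-- the step-3 slice, evaluated: start = min c len, count = ceil((len - start)/3)
theorem pvSliceStep3 (cs : List Char) (c : Nat) :
    PySem.List.slice? cs (some (c : Int)) none 3
      = some (List.filterMap (fun k => cs[(min c cs.length) + 3 * k]?)
          (List.range ((cs.length - min c cs.length + 2) / 3))) := by
  simp only [PySem.List.slice?, PySem.List.sliceIndices]
  norm_num
  have h0 : ¬ ((c:Int) < 0) := by omega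
  have hs : (min (c:Int) (cs.length:Int)) = ((min c cs.length : Nat) : Int) := by
    simp [Nat.cast_min]
  simp only [if_neg h0, hs]
  have hcount : (if ((min c cs.length : Nat) : Int) < (cs.length:Int) then
      (((cs.length:Int) - ((min c cs.length : Nat):Int) + 3 - 1) / 3).toNat else 0)
      = (cs.length - min c cs.length + 2) / 3 := by
    by_cases h : min c cs.length < cs.length
    · rw [if_pos (by exact_mod_cast h)]; omega
    · rw [if_neg (by exact_mod_cast h)]; omega
  rw [hcount]
  congr 1

theorem pvL3 : ∀ (n : Nat) (ys : List Char), ys.length ≤ n →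
    List.filterMap (fun k => ys[3*k]?) (List.range ((ys.length + 2)/3)) = pvEvery3 ys := by
  intro n
  induction n with
  | zero =>
    intro ys h
    have : ys = [] := List.eq_nil_of_length_eq_zero (Nat.le_zero.mp h)
    subst this; simp [pvEvery3]
  | succ n ih =>
    intro ys h
    rcases ys with _ | ⟨a, t⟩
    · simp [pvEvery3]
    · have hcount : ((a :: t).length + 2) / 3 = t.length / 3 + 1 := by simp; omega
      rw [hcount, List.range_succ_eq_map, List.filterMap_cons, List.filterMap_map]
      have h0 : (a :: t)[3*0]? = some a := rfl
      simp only [h0]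
      have hfun : (fun k => (a :: t)[3*((·+1) k)]?) = fun k => (t.drop 2)[3*k]? := by
        funext k
        show (a :: t)[3*(k+1)]? = (t.drop 2)[3*k]?
        rw [List.getElem?_drop]
        show (a :: t)[3*k+3]? = t[2 + 3*k]?
        rw [show 3*k+3 = (2+3*k)+1 by omega]
        exact List.getElem?_cons_succ
      have hlen : t.length / 3 = ((t.drop 2).length + 2) / 3 := by simp; omega
      rw [pvEvery3]
      simp only [Function.comp] at *
      rw [hfun, hlen, ih (t.drop 2) (by simp at h ⊢; omega)]

theorem pvChan_eq_every3 (cs : List Char) (c : Nat) :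
    pvChan cs c = pvEvery3 (cs.drop c) := by
  rw [pvChan, pvSliceStep3, Option.getD_some]
  have hfun : (fun k => cs[min c cs.length + 3*k]?)
      = fun k => (cs.drop (min c cs.length))[3*k]? := by
    funext k
    rw [List.getElem?_drop]
  have hlen : (cs.length - min c cs.length + 2) / 3
      = ((cs.drop (min c cs.length)).length + 2) / 3 := by simp
  have hdrop : cs.drop (min c cs.length) = cs.drop c := by
    by_cases h : c ≤ cs.length
    · rw [min_eq_left h]
    · rw [min_eq_right (le_of_not_ge h), List.drop_length,
        List.drop_of_length_le (by omega)]
  rw [hfun, hlen, pvL3 _ _ (le_refl _), hdrop]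

-- cursor step: A's wrap rule is division with remainder
theorem pvCursorSucc (L g : Nat) :
    (if g % L + 1 = L then ((g / L) + 1, (0 : Nat)) else (g / L, g % L + 1))
      = ((g + 1) / L, (g + 1) % L) := by
  rcases Nat.eq_zero_or_pos L with hL | hL
  · subst hL; simp [Nat.div_zero, Nat.mod_zero]
  · by_cases h : g % L + 1 = L
    · have hg : g + 1 = L * (g / L + 1) := by
        have := Nat.div_add_mod g L; rw [Nat.mul_succ]; omega
      rw [if_pos h]
      have h1 : (g + 1) / L = g / L + 1 := by rw [hg, Nat.mul_div_cancel_left _ hL]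
      have h2 : (g + 1) % L = 0 := by rw [hg, Nat.mul_mod_right]
      simp [h1, h2]
    · have hr : g % L + 1 < L := by have := Nat.mod_lt g hL; omega
      have hg : g + 1 = L * (g / L) + (g % L + 1) := by have := Nat.div_add_mod g L; omega
      rw [if_neg h]
      have h1 : (g + 1) / L = g / L := by
        rw [hg, Nat.mul_add_div hL, Nat.div_eq_of_lt hr, Nat.add_zero]
      have h2 : (g + 1) % L = g % L + 1 := by
        rw [hg, Nat.mul_add_mod, Nat.mod_eq_of_lt hr]
      simp [h1, h2]

theorem pvMod3_0 (g : Nat) : PySem.Int.mod (3 * (g : Int)) 3 = 0 := by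
  simp [PySem.Int.mod]
theorem pvMod3_1 (g : Nat) : PySem.Int.mod (3 * (g : Int) + 1) 3 = 1 := by
  simp [PySem.Int.mod]
theorem pvMod3_2 (g : Nat) : PySem.Int.mod (3 * (g : Int) + 1 + 1) 3 = 2 := by
  simp only [PySem.Int.mod]
  rw [Int.fmod_eq_emod, if_pos (Or.inl (by norm_num : (0:Int) ≤ 3))]
  omega

-- A's interleaved pass, decomposed into the three sequential channel passes
theorem pvMainA (L : Nat) :
    ∀ (n : Nat) (rest : List Char) (g : Nat) (m : List (List (List String))),
      rest.length ≤ n →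
      ((PySem.List.enumerate rest (3 * (g : Int))).foldl (pvStepA L) (m, g / L, g % L)).1
        = pvFillSeq L 3 (pvEvery3 (rest.drop 2)) g
            (pvFillSeq L 2 (pvEvery3 (rest.drop 1)) g
              (pvFillSeq L 1 (pvEvery3 rest) g m)) := by
  intro n
  induction n with
  | zero =>
    intro rest g m hn
    have h0 : rest = [] := List.eq_nil_of_length_eq_zero (Nat.le_zero.mp hn)
    subst h0
    simp [PySem.List.enumerate, pvEvery3, pvFillSeq]
  | succ n ih =>
    intro rest g m hn
    have e0 := pvMod3_0 g
    have e1 := pvMod3_1 g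
    have e2 := pvMod3_2 g
    rcases rest with _ | ⟨a, rest1⟩
    · simp [PySem.List.enumerate, pvEvery3, pvFillSeq]
    rcases rest1 with _ | ⟨b, rest2⟩
    · -- one trailing character: channel 1 only
      simp only [PySem.List.enumerate_cons, PySem.List.enumerate_nil, List.foldl_cons,
        List.foldl_nil, pvStepA, e0]
      norm_num
      simp [pvEvery3, pvFillSeq]
    rcases rest2 with _ | ⟨c, rest'⟩
    · -- two trailing characters: channels 1 and 2
      simp only [PySem.List.enumerate_cons, PySem.List.enumerate_nil, List.foldl_cons,
        List.foldl_nil, pvStepA, e0, e1]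
      norm_num
      simp [pvEvery3, pvFillSeq]
    · -- a full group: three writes, then the cursor advances
      simp only [PySem.List.enumerate_cons, List.foldl_cons, pvStepA, e0, e1, e2]
      norm_num
      have hc1 : pvEvery3 (a :: b :: c :: rest') = a :: pvEvery3 rest' := by
        rw [pvEvery3]; rfl
      have hc2 : pvEvery3 (b :: c :: rest') = b :: pvEvery3 (rest'.drop 1) := by
        rw [pvEvery3]; rfl
      have hc3 : pvEvery3 (c :: rest') = c :: pvEvery3 (rest'.drop 2) := by
        rw [pvEvery3]
      rw [hc1, hc2, hc3, pvFillSeq, pvFillSeq, pvFillSeq,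
        ← pvFillSeq_write_comm L 2 1 (by decide), ← pvFillSeq_write_comm L 3 2 (by decide),
        ← pvFillSeq_write_comm L 3 1 (by decide)]
      have hcast : (3 * (g : Int) + 1 + 1 + 1) = 3 * ((g + 1 : Nat) : Int) := by push_cast; ring
      rw [hcast]
      have key := ih rest' (g + 1)
        (pvWrite (pvWrite (pvWrite m 1 (g / L) (g % L) a) 2 (g / L) (g % L) b)
          3 (g / L) (g % L) c) (by simp at hn; omega)
      have hcur := pvCursorSucc L g
      by_cases hk : g % L + 1 = L
      · rw [if_pos hk]
        rw [if_pos hk] at hcur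
        have h1 : g / L + 1 = (g + 1) / L := congrArg Prod.fst hcur
        have h2 : (0 : Nat) = (g + 1) % L := congrArg Prod.snd hcur
        rw [← h1, ← h2] at key
        exact key
      · rw [if_neg hk]
        rw [if_neg hk] at hcur
        have h1 : g / L = (g + 1) / L := congrArg Prod.fst hcur
        have h2 : g % L + 1 = (g + 1) % L := congrArg Prod.snd hcur
        rw [← h1, ← h2] at key
        exact key

-- B's per-plane loop equals the plane-level sequential spec (rows are chunks of L groups)
theorem pvChunk (L : Nat) (hL : 1 ≤ L) :
    ∀ (chars : List Char) (t j : Nat) (p : List (List String)),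
      t + chars.length ≤ L →
      pvFillSeqP L chars (j * L + t) p = p.set j (pvFillRow (p.getD j []) t chars) := by
  intro chars
  induction chars with
  | nil =>
    intro t j p _
    rw [pvFillSeqP, pvFillRow]
    exact (pvSetGetDSelf p j []).symm
  | cons ch rest ih =>
    intro t j p h
    have ht : t < L := by simp at h; omega
    have hdiv : (j * L + t) / L = j := by
      rw [Nat.mul_comm, Nat.mul_add_div (by omega), Nat.div_eq_of_lt ht]; omega
    have hmod : (j * L + t) % L = t := by
      rw [Nat.mul_comm, Nat.mul_add_mod, Nat.mod_eq_of_lt ht]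
    rw [pvFillSeqP, hdiv, hmod, show j*L+t+1 = j*L+(t+1) by omega,
      ih (t+1) j _ (by simp at h ⊢; omega), List.set_set, pvGetDSetSelf]
    by_cases hj : j < p.length
    · rw [if_pos hj, pvFillRow]
    · rw [if_neg hj, List.set_eq_of_length_le (le_of_not_gt hj),
        List.set_eq_of_length_le (le_of_not_gt hj)]

theorem pvFillSeqP_append (L : Nat) (xs ys : List Char) :
    ∀ (g : Nat) (p : List (List String)),
      pvFillSeqP L (xs ++ ys) g p = pvFillSeqP L ys (g + xs.length) (pvFillSeqP L xs g p) := by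
  induction xs with
  | nil => intro g p; simp [pvFillSeqP]
  | cons ch rest ih =>
    intro g p
    rw [List.cons_append, pvFillSeqP, pvFillSeqP, ih]
    congr 1
    simp
    omega

theorem pvFillPlane_eq (L : Nat) :
    ∀ (fuel : Nat) (chars : List Char) (j : Nat) (p : List (List String)),
      (1 ≤ L ∨ chars = []) → chars.length ≤ fuel →
      pvFillPlane L fuel p j chars = pvFillSeqP L chars (j * L) p := by
  intro fuel
  induction fuel with
  | zero =>
    intro chars j p _ hf
    have : chars = [] := List.eq_nil_of_length_eq_zero (Nat.le_zero.mp hf)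
    subst this
    rw [pvFillPlane, pvFillSeqP]
  | succ fuel ih =>
    intro chars j p hLc hf
    rcases chars with _ | ⟨ch, rest⟩
    · rw [pvFillPlane, if_pos (by rfl), pvFillSeqP]
    · have hL : 1 ≤ L := hLc.resolve_right (by simp)
      rw [pvFillPlane, if_neg (by simp)]
      rw [ih ((ch :: rest).drop L) (j+1) _ (Or.inl hL) (by simp at hf ⊢; omega)]
      conv_rhs => rw [← List.take_append_drop L (ch :: rest)]
      rw [pvFillSeqP_append,
        show j*L = j*L+0 by omega,
        pvChunk L hL _ 0 j p (by simp),
        show j*L+0 = j*L by omega]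
      by_cases hlen : L ≤ (ch :: rest).length
      · rw [List.length_take_of_le hlen, show j*L+L = (j+1)*L by ring]
      · rw [List.drop_of_length_le (le_of_not_ge hlen), pvFillSeqP, pvFillSeqP]

-- one staged pass of B: setting plane c to its filled version is the channel-c sequential pass
theorem pvFillSeq_nil (L c g : Nat) (m : List (List (List String))) :
    pvFillSeq L c [] g m = m := rfl

theorem pvPlaneStep (L c : Nat) (X : List Char) (M : List (List (List String)))
    (p : List (List String)) (hp : M.getD c [] = p) (h : 1 ≤ L ∨ X = []) :
    M.set c (pvFillPlane L X.length p 0 X) = pvFillSeq L c X 0 M := by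
  subst hp
  rw [pvFillPlane_eq L X.length X 0 _ h (le_refl _), Nat.zero_mul, pvFillSeq_eq_planeLevel]

-- ===== VERDICT (by name: the statement is the Claim_ definition above) =====
theorem stegano_spec : Claim_equal_stegano := by
  intro matrix ciphertext _hdom hpre
  obtain ⟨h2, h21, hLor, hbound⟩ := hpre
  unfold Spec_stegano
  rcases matrix with _ | ⟨m0, mt⟩
  · simp at h2
  rcases mt with _ | ⟨p1, rest⟩
  · simp at h2
  -- abbreviations (definitional): M, L, cs, the three channel strings
  have hA := pvMainA (((( m0 :: p1 :: rest).getD 1 []).getD 1 []).length)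
    ciphertext.toList.length ciphertext.toList 0 (m0 :: p1 :: rest) (le_refl _)
  simp only [Nat.cast_zero, mul_zero, Nat.zero_div, Nat.zero_mod] at hA
  have hAe : stegano (m0 :: p1 :: rest) ciphertext
      = pvFillSeq ((p1.getD 1 []).length) 3 (pvEvery3 (ciphertext.toList.drop 2)) 0
          (pvFillSeq ((p1.getD 1 []).length) 2 (pvEvery3 (ciphertext.toList.drop 1)) 0
            (pvFillSeq ((p1.getD 1 []).length) 1 (pvEvery3 ciphertext.toList) 0
              (m0 :: p1 :: rest))) := by
    simpa [stegano] using hA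
  rw [hAe]
  have hX1 : 1 ≤ (p1.getD 1 []).length ∨ pvEvery3 ciphertext.toList = [] := by
    rcases hLor with h | h
    · right; rw [h]; simp [pvEvery3]
    · left; exact h
  have hX2 : 1 ≤ (p1.getD 1 []).length ∨ pvEvery3 (ciphertext.toList.drop 1) = [] := by
    rcases hLor with h | h
    · right; rw [h]; simp [pvEvery3]
    · left; exact h
  have hX3 : 1 ≤ (p1.getD 1 []).length ∨ pvEvery3 (ciphertext.toList.drop 2) = [] := by
    rcases hLor with h | h
    · right; rw [h]; simp [pvEvery3]
    · left; exact h
  have hslice : PySem.List.slice (m0 :: p1 :: rest) (some 1) (some 4)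
      = (p1 :: rest).take 3 := by
    rw [show (1:Int) = ((1:Nat):Int) by norm_num, show (4:Int) = ((4:Nat):Int) by norm_num,
      PySem.List.slice_natCast]
    norm_num
  rcases rest with _ | ⟨p2, rest2⟩
  · -- matrix has only plane 1: Pre_ forces at most one ciphertext character
    have hn1 : ciphertext.toList.length ≤ 1 := by
      by_contra h
      have := (hbound 1 (by omega)).1
      norm_num at this
    have hd1 : ciphertext.toList.drop 1 = [] := List.drop_of_length_le hn1
    have hd2 : ciphertext.toList.drop 2 = [] := List.drop_of_length_le (by omega)
    rw [hd1, hd2]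
    simp only [show pvEvery3 [] = [] from by simp [pvEvery3], pvFillSeq_nil]
    rw [show stegano_alt (m0 :: p1 :: []) ciphertext
        = (m0 :: p1 :: []).set 1
            (pvFillPlane ((p1.getD 1 []).length) (pvChan ciphertext.toList 0).length
              p1 0 (pvChan ciphertext.toList 0)) from by
      simp [stegano_alt, hslice, List.zipIdx]]
    rw [pvChan_eq_every3, List.drop_zero,
      pvPlaneStep _ 1 _ (m0 :: p1 :: []) p1 rfl hX1]
  rcases rest2 with _ | ⟨p3, rest3⟩
  · -- planes 1 and 2 exist: Pre_ forces at most two ciphertext characters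
    have hn2 : ciphertext.toList.length ≤ 2 := by
      by_contra h
      have := (hbound 2 (by omega)).1
      norm_num at this
    have hd2 : ciphertext.toList.drop 2 = [] := List.drop_of_length_le hn2
    rw [hd2]
    simp only [show pvEvery3 [] = [] from by simp [pvEvery3], pvFillSeq_nil]
    rw [show stegano_alt (m0 :: p1 :: p2 :: []) ciphertext
        = ((m0 :: p1 :: p2 :: []).set 1
            (pvFillPlane ((p1.getD 1 []).length) (pvChan ciphertext.toList 0).length
              p1 0 (pvChan ciphertext.toList 0))).set 2
            (pvFillPlane ((p1.getD 1 []).length) (pvChan ciphertext.toList 1).length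
              p2 0 (pvChan ciphertext.toList 1)) from by
      simp [stegano_alt, hslice, List.zipIdx]]
    rw [pvChan_eq_every3, pvChan_eq_every3, List.drop_zero,
      pvPlaneStep _ 1 _ (m0 :: p1 :: p2 :: []) p1 rfl hX1]
    have hg2 : (pvFillSeq ((p1.getD 1 []).length) 1 (pvEvery3 ciphertext.toList) 0
        (m0 :: p1 :: p2 :: [])).getD 2 [] = p2 := by
      rw [pvFillSeq_eq_planeLevel, pvGetDSetNe _ _ _ (by decide)]; rfl
    rw [pvPlaneStep _ 2 _ _ p2 hg2 hX2]
  · -- all three planes exist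
    rw [show stegano_alt (m0 :: p1 :: p2 :: p3 :: rest3) ciphertext
        = (((m0 :: p1 :: p2 :: p3 :: rest3).set 1
            (pvFillPlane ((p1.getD 1 []).length) (pvChan ciphertext.toList 0).length
              p1 0 (pvChan ciphertext.toList 0))).set 2
            (pvFillPlane ((p1.getD 1 []).length) (pvChan ciphertext.toList 1).length
              p2 0 (pvChan ciphertext.toList 1))).set 3
            (pvFillPlane ((p1.getD 1 []).length) (pvChan ciphertext.toList 2).length
              p3 0 (pvChan ciphertext.toList 2)) from by
      simp [stegano_alt, hslice, List.zipIdx]]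
    rw [pvChan_eq_every3, pvChan_eq_every3, pvChan_eq_every3, List.drop_zero,
      pvPlaneStep _ 1 _ (m0 :: p1 :: p2 :: p3 :: rest3) p1 rfl hX1]
    have hg2 : (pvFillSeq ((p1.getD 1 []).length) 1 (pvEvery3 ciphertext.toList) 0
        (m0 :: p1 :: p2 :: p3 :: rest3)).getD 2 [] = p2 := by
      rw [pvFillSeq_eq_planeLevel, pvGetDSetNe _ _ _ (by decide)]; rfl
    rw [pvPlaneStep _ 2 _ _ p2 hg2 hX2]
    have hg3 : (pvFillSeq ((p1.getD 1 []).length) 2 (pvEvery3 (ciphertext.toList.drop 1)) 0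
        (pvFillSeq ((p1.getD 1 []).length) 1 (pvEvery3 ciphertext.toList) 0
          (m0 :: p1 :: p2 :: p3 :: rest3))).getD 3 [] = p3 := by
      rw [pvFillSeq_eq_planeLevel, pvGetDSetNe _ _ _ (by decide),
        pvFillSeq_eq_planeLevel, pvGetDSetNe _ _ _ (by decide)]; rfl
    rw [pvPlaneStep _ 3 _ _ p3 hg3 hX3]
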